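-- pv_equiv track=rewrite | github.com/MixBass/Task1 | NewsClassification/NewsCollection/checks.py | checkSearchLine
-- ===== SOURCE A (Python) =====
-- def basicCheckStr(strForCheck, lengthLimit):
--     if isinstance(strForCheck, str):
--         if strForCheck:
--             if len(strForCheck) <= lengthLimit:
--                 return True
--             else:
--                 return False
--         else:
--             return False
--     else:
--         return False
--
-- def checkSearchLine(searchLine):
--     if basicCheckStr(searchLine, 100):
--         words = searchLine.split("-")
--         for word in words:
--             if not word:
--                 return False
--         return True
--     else:
--         return False
-- ===== SOURCE B (Python) =====
-- def checkSearchLine(searchLine):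
--     # Validate the dash structure directly on the raw string: an empty split
--     # segment exists exactly when the string starts or ends with a dash or
--     # contains two adjacent dashes.
--     return (isinstance(searchLine, str)
--             and 0 < len(searchLine) <= 100
--             and not searchLine.startswith("-")
--             and not searchLine.endswith("-")
--             and "--" not in searchLine)
-- ===== Notes on version B (the rewrite author's own statement) =====
-- stated objective: idiomatic
-- what changed: B drops the split-on-dash list and the empty-segment loop, checking the three substring conditions (leading dash, trailing dash, adjacent double dash) on the raw string in one boolean expression.
import Mathlib
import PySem

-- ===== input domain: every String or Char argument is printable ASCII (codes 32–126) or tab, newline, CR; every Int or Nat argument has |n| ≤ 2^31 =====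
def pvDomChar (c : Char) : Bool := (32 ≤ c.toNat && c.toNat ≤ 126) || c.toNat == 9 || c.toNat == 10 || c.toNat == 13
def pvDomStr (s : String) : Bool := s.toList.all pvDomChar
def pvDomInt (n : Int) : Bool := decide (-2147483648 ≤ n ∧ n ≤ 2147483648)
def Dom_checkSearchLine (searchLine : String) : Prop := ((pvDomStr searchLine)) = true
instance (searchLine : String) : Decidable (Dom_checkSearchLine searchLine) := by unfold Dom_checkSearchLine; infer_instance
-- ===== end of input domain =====

-- B replaces A's split-on-dash-and-scan-for-empty-segment loop by three direct substring
-- checks on the raw string (idiomatic; same cost, no intermediate list).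

-- ===== PORT A =====
-- isinstance(strForCheck, str) is always true for a String argument, so that guard is the identity here.
def basicCheckStr (strForCheck : String) (lengthLimit : Int) : Bool :=
  if strForCheck.toList ≠ [] then
    if PySem.Str.len strForCheck ≤ lengthLimit then true else false
  else false

-- the 'for word in words: if not word: return False / return True' loop
def checkWordsLoop : List (List Char) → Bool
  | [] => true
  | w :: ws => if w.isEmpty then false else checkWordsLoop ws

def checkSearchLine (searchLine : String) : Bool :=
  if basicCheckStr searchLine 100 then
    checkWordsLoop (PySem.Chars.splitOn searchLine.toList ("-".toList))
  else false

-- ===== PORT B =====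
def checkSearchLine_alt (searchLine : String) : Bool :=
  (0 < PySem.Str.len searchLine) && (PySem.Str.len searchLine ≤ 100)
  && !(PySem.Str.startswith searchLine "-")
  && !(PySem.Str.endswith searchLine "-")
  && !(PySem.Str.isIn "--" searchLine)

-- ===== PRECONDITION & SPEC =====
def Spec_checkSearchLine (searchLine : String) (out : Bool) : Prop := out = checkSearchLine_alt searchLine
instance (searchLine : String) (out : Bool) : Decidable (Spec_checkSearchLine searchLine out) := by unfold Spec_checkSearchLine; infer_instance

-- ===== CLAIM (what is proved, stated in full; the proofs are below) =====
def Claim_equal_checkSearchLine : Prop := ∀ (searchLine : String), Dom_checkSearchLine searchLine → Spec_checkSearchLine searchLine (checkSearchLine searchLine)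

-- ===== LEMMAS AND PROOFS =====

-- structural single-char '-' split (proof-side reformulation of PySem.Chars.splitOn.go)
def split1 : List Char → List (List Char)
  | [] => [[]]
  | c :: r => if c = '-' then [] :: split1 r else (split1 r).modifyHead (c :: ·)

-- two-state automaton: 'runOK true cs' = rest of the string is fine while inside a nonempty
-- segment; 'runOK false cs' = cs must open a fresh nonempty segment
def runOK (inPiece : Bool) : List Char → Bool
  | [] => inPiece
  | c :: r => if c = '-' then (if inPiece then runOK false r else false) else runOK true r

theorem split1_ne_nil (cs : List Char) : split1 cs ≠ [] := by
  cases cs with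
  | nil => simp [split1]
  | cons c r =>
    simp only [split1]
    split
    · simp
    · cases h : split1 r with
      | nil => exact absurd h (split1_ne_nil r)
      | cons a t => simp

theorem go_eq (l : List Char) (fuel : Nat) (cur : List Char) (acc : List (List Char))
    (hf : l.length < fuel) :
    PySem.Chars.splitOn.go ("-".toList) fuel l cur acc
      = acc.reverse ++ (split1 l).modifyHead (cur.reverse ++ ·) := by
  induction l generalizing fuel cur acc with
  | nil =>
    cases fuel with
    | zero => omega
    | succ f => simp [PySem.Chars.splitOn.go, split1]
  | cons c r ih =>
    cases fuel with
    | zero => omega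
    | succ f =>
      have hlt : r.length < f := by simp at hf; omega
      by_cases hc : c = '-'
      · subst hc
        have hpre : ("-".toList).isPrefixOf ('-' :: r) = true := by
          simp [List.isPrefixOf]
        simp only [PySem.Chars.splitOn.go, hpre, if_true]
        have hdrop : List.drop ("-".toList.length) ('-' :: r) = r := rfl
        rw [hdrop, ih f [] (cur.reverse :: acc) hlt]
        cases hsr : split1 r with
        | nil => exact absurd hsr (split1_ne_nil r)
        | cons a t => simp [split1, hsr]
      · have hpre : ("-".toList).isPrefixOf (c :: r) = false := by
          have : (('-' : Char) == c) = false := beq_eq_false_iff_ne.mpr (fun h => hc h.symm)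
          simp [List.isPrefixOf, this]
        simp only [PySem.Chars.splitOn.go, hpre, Bool.false_eq_true, if_false]
        rw [ih f (c :: cur) acc hlt]
        simp only [split1, if_neg hc]
        cases h : split1 r with
        | nil => exact absurd h (split1_ne_nil r)
        | cons a t => simp

theorem splitOn_eq_split1 (cs : List Char) :
    PySem.Chars.splitOn cs ("-".toList) = split1 cs := by
  rw [PySem.Chars.splitOn, go_eq cs (cs.length + 1) [] [] (by omega)]
  cases h : split1 cs with
  | nil => exact absurd h (split1_ne_nil cs)
  | cons a t => simp

theorem loop_eq_all (ws : List (List Char)) :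
    checkWordsLoop ws = ws.all (fun w => !w.isEmpty) := by
  induction ws with
  | nil => rfl
  | cons w ws ih =>
    simp only [checkWordsLoop, List.all_cons, ih]
    cases w <;> simp

theorem all_split1 (cs : List Char) :
    ((split1 cs).all (fun w => !w.isEmpty) = runOK false cs)
      ∧ ((split1 cs).tail.all (fun w => !w.isEmpty) = runOK true cs) := by
  induction cs with
  | nil => simp [split1, runOK]
  | cons c r ih =>
    obtain ⟨ih1, ih2⟩ := ih
    by_cases hc : c = '-'
    · subst hc
      constructor
      · simp [split1, runOK]
      · simpa [split1, runOK] using ih1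
    · cases h : split1 r with
      | nil => exact absurd h (split1_ne_nil r)
      | cons a t =>
        rw [h] at ih2
        constructor
        · simp only [split1, h, List.modifyHead, List.all_cons, List.isEmpty_cons,
            Bool.not_false, Bool.true_and, runOK, if_neg hc]
          simpa using ih2
        · simp only [split1, h, List.modifyHead, List.tail_cons, runOK, if_neg hc]
          simpa using ih2

theorem startswith_decide (cs p : List Char) :
    PySem.Chars.startswith cs p = decide (p <+: cs) := by
  rw [Bool.eq_iff_iff]; simp [PySem.Chars.startswith_iff]

theorem endswith_decide (cs p : List Char) :
    PySem.Chars.endswith cs p = decide (p <:+ cs) := by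
  rw [Bool.eq_iff_iff]; simp [PySem.Chars.endswith_iff]

theorem isIn_decide (sub cs : List Char) :
    PySem.Chars.isIn sub cs = decide (sub <:+: cs) := by
  rw [Bool.eq_iff_iff]; simp [PySem.Chars.isIn_iff_infix]

theorem suffix_single_cons (c d : Char) (r' : List Char) :
    (['-'] : List Char) <:+ (c :: d :: r') ↔ (['-'] : List Char) <:+ (d :: r') := by
  rw [List.suffix_cons_iff]
  constructor
  · rintro (h | h)
    · simp at h
    · exact h
  · exact Or.inr

theorem runOK_char (cs : List Char) :
    (runOK true cs = (!decide ((['-'] : List Char) <:+ cs)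
        && !decide ((['-', '-'] : List Char) <:+: cs)))
      ∧ (runOK false cs = (!cs.isEmpty && !decide ((['-'] : List Char) <+: cs)
        && !decide ((['-'] : List Char) <:+ cs)
        && !decide ((['-', '-'] : List Char) <:+: cs))) := by
  induction cs with
  | nil => simp [runOK]
  | cons c r ih =>
    obtain ⟨ihT, ihF⟩ := ih
    by_cases hc : c = '-'
    · subst hc
      cases r with
      | nil => simp [runOK]
      | cons d r' =>
        constructor
        · rw [show runOK true ('-' :: d :: r') = runOK false (d :: r') from rfl, ihF]
          have hinf : (['-', '-'] : List Char) <:+: ('-' :: d :: r')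
              ↔ ((['-'] : List Char) <+: (d :: r') ∨ (['-', '-'] : List Char) <:+: (d :: r')) := by
            rw [List.infix_cons_iff]
            constructor
            · rintro (h | h)
              · rcases h with ⟨t, ht⟩
                refine Or.inl ⟨t, ?_⟩
                simp at ht
                obtain ⟨hd1, ht2⟩ := ht
                subst ht2
                rw [← hd1]
                simp
              · exact Or.inr h
            · rintro (⟨t, ht⟩ | h)
              · exact Or.inl ⟨t, by rw [← ht]; simp⟩
              · exact Or.inr h
          rw [Bool.eq_iff_iff]
          simp [suffix_single_cons, hinf]
          tauto
        · rw [show runOK false ('-' :: d :: r') = false from rfl]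
          have hp : (['-'] : List Char) <+: ('-' :: d :: r') := ⟨d :: r', rfl⟩
          simp [hp]
    · have hpre1 : ¬ ((['-'] : List Char) <+: (c :: r)) := by
        rintro ⟨t, ht⟩; simp at ht; exact hc ht.1.symm
      have hT : runOK true (c :: r) = runOK true r := by simp [runOK, hc]
      have hF : runOK false (c :: r) = runOK true r := by simp [runOK, hc]
      have key : runOK true (c :: r) = (!decide ((['-'] : List Char) <:+ (c :: r))
          && !decide ((['-', '-'] : List Char) <:+: (c :: r))) := by
        cases r with
        | nil =>
          rw [hT]
          have h1 : ¬ ((['-'] : List Char) <:+ [c]) := by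
            rintro ⟨t, ht⟩
            have ht' : t = [] := by
              cases t with
              | nil => rfl
              | cons a u =>
                have := congrArg List.length ht
                simp at this
            subst ht'; simp at ht; exact hc ht.symm
          have h2 : ¬ ((['-', '-'] : List Char) <:+: [c]) := by
            intro h; have := h.length_le; simp at this
          simp [runOK, h1, h2]
        | cons d r' =>
          rw [hT, ihT]
          have hinf : (['-', '-'] : List Char) <:+: (c :: d :: r')
              ↔ (['-', '-'] : List Char) <:+: (d :: r') := by
            rw [List.infix_cons_iff]
            constructor
            · rintro (h | h)
              · rcases h with ⟨t, ht⟩; simp at ht; exact absurd ht.1.symm hc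
              · exact h
            · exact Or.inr
          rw [Bool.eq_iff_iff]
          simp [suffix_single_cons, hinf]
      refine ⟨key, ?_⟩
      rw [hF, ← hT, key, Bool.eq_iff_iff]
      simp [hpre1]

-- ===== VERDICT (by name: the statement is the Claim_ definition above) =====
theorem checkSearchLine_spec : Claim_equal_checkSearchLine := by
  intro s _
  unfold Spec_checkSearchLine checkSearchLine checkSearchLine_alt
  by_cases h1 : s.toList = []
  · simp [basicCheckStr, h1, PySem.Str.len_eq]
  · by_cases h2 : PySem.Str.len s ≤ 100
    · have hb : basicCheckStr s 100 = true := by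
        unfold basicCheckStr; rw [if_pos h1, if_pos h2]
      simp only [hb, if_true]
      rw [splitOn_eq_split1, loop_eq_all, (all_split1 s.toList).1, (runOK_char s.toList).2,
        PySem.Str.startswith_eq, PySem.Str.endswith_eq, PySem.Str.isIn_eq,
        startswith_decide, endswith_decide, isIn_decide]
      have h0 : (0 : Int) < PySem.Str.len s := by
        rw [PySem.Str.len_eq]
        cases hl : s.toList with
        | nil => exact absurd hl h1
        | cons a t => simp
      have hne : s.toList.isEmpty = false := by simp [h1]
      have hl : s.toList.length = s.length := by simp
      have h0n : 0 < s.length := by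
        rw [PySem.Str.len_eq, hl] at h0; exact_mod_cast h0
      have h2n : s.length ≤ 100 := by
        rw [PySem.Str.len_eq, hl] at h2; exact_mod_cast h2
      simp only [show ("-".toList : List Char) = ['-'] from rfl,
        show ("--".toList : List Char) = ['-', '-'] from rfl]
      simp [h0n, h2n, hne, Bool.and_assoc]
    · have hb : basicCheckStr s 100 = false := by
        unfold basicCheckStr; rw [if_pos h1, if_neg h2]
      have h2n : ¬ s.length ≤ 100 := by
        intro h; apply h2
        rw [PySem.Str.len_eq, show s.toList.length = s.length from by simp]
        exact_mod_cast h
      simp [hb, h2n]
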